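-- pv_equiv track=rewrite | github.com/vladimirbuskin/yndx-algo | sprint1/l.py | solution
-- ===== SOURCE A (Python) =====
-- def solution(str1, str2):
--   d = {}
--   for i in range(len(str2)):
--     d[str2[i]] = d.get(str2[i], 0) + 1
--
--   for i in range(len(str1)):
--     d[str1[i]] = d.get(str1[i], 0) - 1
--
--   for k in d:
--     if d[k]>0:
--       return k
--
--   return None
-- ===== SOURCE B (Python) =====
-- def solution(str1, str2):
--   for c in str2:
--     if str2.count(c) > str1.count(c):
--       return c
--   return None
-- ===== Notes on version B (the rewrite author's own statement) =====
-- stated objective: simpler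
-- what changed: Replaces the prebuilt increment/decrement count dictionary and key scan with a single positional scan of str2 that compares str2.count(c) against str1.count(c) per character.
import Mathlib
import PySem

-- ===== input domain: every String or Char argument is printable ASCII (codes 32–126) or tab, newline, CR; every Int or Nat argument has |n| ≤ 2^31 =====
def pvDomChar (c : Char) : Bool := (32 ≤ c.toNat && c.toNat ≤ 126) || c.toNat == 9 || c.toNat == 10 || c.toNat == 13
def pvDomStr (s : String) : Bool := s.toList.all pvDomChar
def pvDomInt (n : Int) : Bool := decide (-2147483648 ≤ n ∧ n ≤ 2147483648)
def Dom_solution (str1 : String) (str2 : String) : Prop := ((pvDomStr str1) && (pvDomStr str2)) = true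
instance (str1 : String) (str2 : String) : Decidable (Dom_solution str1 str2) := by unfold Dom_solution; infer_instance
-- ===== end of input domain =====

-- B drops A's increment/decrement count dictionary for a single positional scan of str2
-- comparing per-character counts (simpler; not faster).

-- ===== PORT A =====
-- 'for i in range(len(str2)): … str2[i] …' visits exactly str2's characters in order: folded over toList.
def solution (str1 : String) (str2 : String) : Option String :=
  let d : PySem.Dict Char Int :=
    str2.toList.foldl (fun d c => d.insert c (d.getD c 0 + 1)) PySem.Dict.empty
  let d : PySem.Dict Char Int :=
    str1.toList.foldl (fun d c => d.insert c (d.getD c 0 - 1)) d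
  match d.keys.find? (fun k => decide (0 < d.getD k 0)) with
  | some k => some (String.ofList [k])
  | none => none

-- ===== PORT B =====
def solution_alt (str1 : String) (str2 : String) : Option String :=
  match str2.toList.find? (fun c => decide (str1.toList.count c < str2.toList.count c)) with
  | some c => some (String.ofList [c])
  | none => none

-- ===== PRECONDITION & SPEC =====
def Spec_solution (str1 : String) (str2 : String) (out : Option String) : Prop := out = solution_alt str1 str2
instance (str1 : String) (str2 : String) (out : Option String) : Decidable (Spec_solution str1 str2 out) := by unfold Spec_solution; infer_instance

-- ===== CLAIM (what is proved, stated in full; the proofs are below) =====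
def Claim_equal_solution : Prop := ∀ (str1 : String) (str2 : String), Dom_solution str1 str2 → Spec_solution str1 str2 (solution str1 str2)

-- ===== LEMMAS AND PROOFS =====

-- the decrement loop: getD of the result is getD of the start minus the count in the list
theorem getD_foldl_insert_sub_one (l : List Char) (d : PySem.Dict Char Int) (v : Char) :
    (l.foldl (fun d c => d.insert c (d.getD c 0 - 1)) d).getD v 0 = d.getD v 0 - l.count v := by
  induction l generalizing d with
  | nil => simp
  | cons x l ih =>
    simp only [List.foldl_cons, ih, PySem.Dict.getD_insert, List.count_cons]
    by_cases h : v = x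
    · simp [h]; ring
    · simp [h]; exact fun hh => h hh.symm

-- find? over a Set.update sees the base first, then the fresh elements of the tail
theorem find?_set_update (p : Char → Bool) (l : List Char) (s : PySem.Set Char) :
    List.find? p (PySem.Set.update s l) = (List.find? p s).or (List.find? p l) := by
  induction l generalizing s with
  | nil => simp [PySem.Set.update]
  | cons x l ih =>
    have hupd : PySem.Set.update s (x :: l) = PySem.Set.update (PySem.Set.add s x) l := by
      simp [PySem.Set.update]
    rw [hupd, ih]
    by_cases hx : x ∈ s
    · have hadd : PySem.Set.add s x = s := by
        simp [PySem.Set.add, PySem.Set.contains, hx]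
      rw [hadd]
      cases hfs : List.find? p s with
      | some y => simp
      | none =>
        have hpx : p x = false := by
          have := List.find?_eq_none.mp hfs x hx
          simpa using this
        rw [List.find?_cons_of_neg (by simp [hpx])]
    · have hadd : PySem.Set.add s x = s ++ [x] := by
        simp [PySem.Set.add, PySem.Set.contains, hx]
      rw [hadd, List.find?_append]
      have hcons : List.find? p (x :: l) = (List.find? p [x]).or (List.find? p l) := by
        cases hpx : p x
        · rw [List.find?_cons_of_neg (by simp [hpx]), List.find?_cons_of_neg (by simp [hpx])]
          simp
        · rw [List.find?_cons_of_pos (by simp [hpx]), List.find?_cons_of_pos (by simp [hpx])]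
          simp
      rw [hcons, Option.or_assoc]

-- find? over set(xs) (first-occurrence dedup) equals find? over xs
theorem find?_set_ofList (p : Char → Bool) (xs : List Char) :
    List.find? p (PySem.Set.ofList xs) = List.find? p xs := by
  have : PySem.Set.ofList xs = PySem.Set.update PySem.Set.empty xs := rfl
  rw [this, find?_set_update]
  simp [PySem.Set.empty]

-- ===== VERDICT (by name: the statement is the Claim_ definition above) =====
theorem solution_spec : Claim_equal_solution := by
  intro str1 str2 _
  show solution str1 str2 = solution_alt str1 str2
  simp only [solution, solution_alt]
  rw [PySem.Dict.foldl_insert_getD_add_one_eq_counter]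
  have hgetD : ∀ v, (List.foldl (fun d c => d.insert c (d.getD c 0 - 1)) (PySem.Dict.counter str2.toList) str1.toList).getD v 0
      = (List.count v str2.toList : Int) - List.count v str1.toList := by
    intro v
    rw [getD_foldl_insert_sub_one, PySem.Dict.getD_counter]
  have hkeys : (List.foldl (fun d c => d.insert c (d.getD c 0 - 1)) (PySem.Dict.counter str2.toList) str1.toList).keys
      = PySem.Set.update (PySem.Set.ofList str2.toList) str1.toList := by
    rw [PySem.Dict.keys_foldl_insert, PySem.Dict.keys_counter]
  have hpred : (fun k => decide (0 < (List.foldl (fun d c => d.insert c (d.getD c 0 - 1)) (PySem.Dict.counter str2.toList) str1.toList).getD k 0))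
      = fun c => decide (List.count c str1.toList < List.count c str2.toList) := by
    funext k
    rw [hgetD]
    rw [decide_eq_decide]
    omega
  rw [hpred, hkeys, find?_set_update, find?_set_ofList]
  -- keys contributed by str1 never fire: a positive difference forces membership in str2
  cases hfs : List.find? (fun c => decide (List.count c str1.toList < List.count c str2.toList)) str2.toList with
  | some y => simp
  | none =>
    have h1 : List.find? (fun c => decide (List.count c str1.toList < List.count c str2.toList)) str1.toList = none := by
      rw [List.find?_eq_none]
      intro x _
      simp only [decide_eq_true_eq, not_lt]
      by_cases hx : x ∈ str2.toList
      · have := List.find?_eq_none.mp hfs x hx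
        simp only [decide_eq_true_eq, not_lt] at this
        exact this
      · simp [List.count_eq_zero_of_not_mem hx]
    simp [h1]
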